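-- pv_equiv track=rewrite | github.com/SaiAvinashPatoju/exvisit | bench/swebench_lite_harness.py | patch_oracle_rank
-- ===== SOURCE A (Python) =====
-- from typing import Dict, Iterable, List, Optional, Sequence, Set, Tuple
--
-- def patch_oracle_rank(selected_files: Sequence[str], oracle_files: Sequence[str]) -> Tuple[bool, bool, Optional[int], int]:
--     oracle_norm = [f.replace("\\", "/").lower() for f in oracle_files]
--     selected_norm = [f.replace("\\", "/").lower() for f in selected_files]
--     first_oracle_rank = None
--     for idx, rel in enumerate(selected_norm, start=1):
--         if any(rel.endswith(oracle) for oracle in oracle_norm):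
--             first_oracle_rank = idx
--             break
--     oracle_hit = first_oracle_rank is not None
--     oracle_hit_at_1 = first_oracle_rank == 1
--     context_rot = 0 if first_oracle_rank is None else max(0, first_oracle_rank - 1)
--     if not oracle_hit:
--         context_rot = len(selected_files)
--     return oracle_hit, oracle_hit_at_1, first_oracle_rank, context_rot
-- ===== SOURCE B (Python) =====
-- def patch_oracle_rank(selected_files, oracle_files):
--     oracle_set = {f.replace("\\", "/").lower() for f in oracle_files}
--     rank = None
--     for idx, f in enumerate(selected_files, start=1):
--         rel = f.replace("\\", "/").lower()
--         if any(rel[i:] in oracle_set for i in range(len(rel) + 1)):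
--             rank = idx
--             break
--     if rank is None:
--         return False, False, None, len(selected_files)
--     return True, rank == 1, rank, rank - 1
-- ===== Notes on version B (the rewrite author's own statement) =====
-- stated objective: alternative
-- what changed: B builds one hash-set of normalized oracle paths and, for each selected path, probes the set with each of its suffixes, so A's inner any() scan over all oracles disappears; cost shifts from O(S*O*L) to O(O*L + S*L^2) set probes.
import Mathlib
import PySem

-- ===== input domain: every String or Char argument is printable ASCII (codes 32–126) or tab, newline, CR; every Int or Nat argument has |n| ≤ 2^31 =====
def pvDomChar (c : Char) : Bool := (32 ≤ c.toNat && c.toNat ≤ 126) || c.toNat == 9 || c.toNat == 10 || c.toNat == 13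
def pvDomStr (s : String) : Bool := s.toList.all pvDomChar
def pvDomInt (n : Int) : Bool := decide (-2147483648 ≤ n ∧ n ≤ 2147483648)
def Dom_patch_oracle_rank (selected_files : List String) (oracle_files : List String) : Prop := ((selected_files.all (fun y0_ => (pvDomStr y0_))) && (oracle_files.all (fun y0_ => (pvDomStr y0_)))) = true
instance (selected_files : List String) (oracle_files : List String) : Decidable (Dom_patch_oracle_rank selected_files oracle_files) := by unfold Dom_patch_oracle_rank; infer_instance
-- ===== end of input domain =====

-- B replaces A's inner scan over all oracles by one hash-set of normalized oracles probed with the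
-- suffixes of each selected path, keeping A's early break over selected files.

-- ===== PORT A =====
-- f.replace("\\", "/").lower()
def pvNorm (f : String) : String := PySem.Str.lower (PySem.Str.replace f "\\" "/")

-- A's loop over enumerate(selected_norm, start=1) with break; inner any() over oracle_norm
def pvFindA (sel : List String) (os : List String) (i : Int) : Option Int :=
  match sel with
  | [] => none
  | r :: rs => if os.any (fun o => PySem.Str.endswith r o) then some i else pvFindA rs os (i + 1)

def patch_oracle_rank (selected_files : List String) (oracle_files : List String) : Bool × Bool × Option Int × Int :=
  let oracle_norm := oracle_files.map pvNorm
  let selected_norm := selected_files.map pvNorm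
  let first_oracle_rank := pvFindA selected_norm oracle_norm 1
  let oracle_hit := first_oracle_rank.isSome
  let oracle_hit_at_1 := first_oracle_rank == some 1
  let context_rot : Int := match first_oracle_rank with | none => 0 | some r => max 0 (r - 1)
  let context_rot := if oracle_hit then context_rot else (selected_files.length : Int)
  (oracle_hit, oracle_hit_at_1, first_oracle_rank, context_rot)

-- ===== PORT B =====
-- any(rel[i:] in oracle_set for i in range(len(rel) + 1))
def pvSuffixHit (oset : PySem.Set String) (rel : String) : Bool :=
  (PySem.List.pyRange 0 (PySem.Str.len rel + 1) 1).any
    (fun i => PySem.Set.contains oset (PySem.Str.slice rel (some i) none))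

-- B's loop over enumerate(selected_files, start=1) with break
def pvFindB (oset : PySem.Set String) (sel : List String) (i : Int) : Option Int :=
  match sel with
  | [] => none
  | f :: rest =>
    let rel := pvNorm f
    if pvSuffixHit oset rel then some i else pvFindB oset rest (i + 1)

def patch_oracle_rank_alt (selected_files : List String) (oracle_files : List String) : Bool × Bool × Option Int × Int :=
  let oracle_set := PySem.Set.ofList (oracle_files.map pvNorm)
  let rank := pvFindB oracle_set selected_files 1
  match rank with
  | none => (false, false, none, (selected_files.length : Int))
  | some b => (true, b == 1, some b, b - 1)

-- ===== PRECONDITION & SPEC =====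
def Spec_patch_oracle_rank (selected_files : List String) (oracle_files : List String) (out : Bool × Bool × Option Int × Int) : Prop := out = patch_oracle_rank_alt selected_files oracle_files
instance (selected_files : List String) (oracle_files : List String) (out : Bool × Bool × Option Int × Int) : Decidable (Spec_patch_oracle_rank selected_files oracle_files out) := by unfold Spec_patch_oracle_rank; infer_instance

-- ===== CLAIM (what is proved, stated in full; the proofs are below) =====
def Claim_equal_patch_oracle_rank : Prop := ∀ (selected_files : List String) (oracle_files : List String), Dom_patch_oracle_rank selected_files oracle_files → Spec_patch_oracle_rank selected_files oracle_files (patch_oracle_rank selected_files oracle_files)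

-- ===== LEMMAS AND PROOFS =====

theorem pvFindA_ge (os : List String) : ∀ (sel : List String) (i j : Int), pvFindA sel os i = some j → i ≤ j := by
  intro sel
  induction sel with
  | nil => intro i j h; simp [pvFindA] at h
  | cons r rs ih =>
    intro i j h
    simp only [pvFindA] at h
    split at h
    · cases h; omega
    · have := ih (i + 1) j h; omega

-- a suffix probe into the oracle set hits iff some oracle is a suffix of rel
theorem pvSuffixHit_eq_any (os : List String) (rel : String) :
    pvSuffixHit (PySem.Set.ofList os) rel = os.any (fun o => PySem.Str.endswith rel o) := by
  apply Bool.eq_iff_iff.mpr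
  unfold pvSuffixHit
  simp only [List.any_eq_true]
  constructor
  · rintro ⟨i, hi, hc⟩
    obtain ⟨h0, hlt⟩ := PySem.List.mem_pyRange_one.mp hi
    simp only [PySem.Set.contains, List.contains_iff_mem] at hc
    have hmem : PySem.Str.slice rel (some i) none ∈ os := (PySem.Set.mem_ofList _ _).mp hc
    refine ⟨_, hmem, ?_⟩
    rw [PySem.Str.endswith_eq, PySem.Chars.endswith_iff, PySem.Str.toList_slice]
    show PySem.List.slice rel.toList (some i) none <:+ rel.toList
    rw [PySem.List.slice_from rel.toList h0]
    exact List.drop_suffix _ _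
  · rintro ⟨o, ho, hend⟩
    have hs : o.toList <:+ rel.toList := by
      rw [PySem.Str.endswith_eq, PySem.Chars.endswith_iff] at hend
      exact hend
    have hlen : o.toList.length ≤ rel.toList.length := List.IsSuffix.length_le hs
    refine ⟨((rel.toList.length - o.toList.length : Nat) : Int), ?_, ?_⟩
    · apply PySem.List.mem_pyRange_one.mpr
      constructor
      · positivity
      · rw [PySem.Str.len_eq]
        omega
    · have hdrop : o.toList = rel.toList.drop (rel.toList.length - o.toList.length) :=
        List.suffix_iff_eq_drop.mp hs
      have hstr : PySem.Str.slice rel (some ((rel.toList.length - o.toList.length : Nat) : Int)) none = o := by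
        apply String.toList_inj.mp
        rw [PySem.Str.toList_slice]
        show PySem.List.slice rel.toList (some _) none = o.toList
        rw [PySem.List.slice_from rel.toList (by positivity)]
        simp only [Int.toNat_natCast]
        exact hdrop.symm
      rw [hstr]
      simp only [PySem.Set.contains, List.contains_iff_mem]
      exact (PySem.Set.mem_ofList _ _).mpr ho

-- B's single pass over selected files equals A's pass over the normalized list
theorem pvFindB_eq (os : List String) : ∀ (sel : List String) (i : Int),
    pvFindB (PySem.Set.ofList os) sel i = pvFindA (sel.map pvNorm) os i := by
  intro sel
  induction sel with
  | nil => intro i; rfl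
  | cons f rest ih =>
    intro i
    simp only [pvFindB, pvFindA, List.map_cons, pvSuffixHit_eq_any os (pvNorm f)]
    split
    · rfl
    · exact ih (i + 1)

-- ===== VERDICT (by name: the statement is the Claim_ definition above) =====
theorem patch_oracle_rank_spec : Claim_equal_patch_oracle_rank := by
  intro sel ors _
  unfold Spec_patch_oracle_rank
  show patch_oracle_rank sel ors = patch_oracle_rank_alt sel ors
  simp only [patch_oracle_rank, patch_oracle_rank_alt]
  rw [pvFindB_eq (ors.map pvNorm) sel 1]
  cases hf : pvFindA (sel.map pvNorm) (ors.map pvNorm) 1 with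
  | none => simp
  | some b =>
    have hb : (1 : Int) ≤ b := pvFindA_ge _ _ 1 b hf
    simp only [Option.isSome_some, if_pos]
    refine Prod.ext rfl (Prod.ext ?_ (Prod.ext rfl ?_))
    · simp
    · show max 0 (b - 1) = b - 1
      omega
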